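-- pv_equiv track=rewrite | github.com/cRakhorst/python-projects | advent-of-code/advent8.py | find_unique_paths
-- ===== SOURCE A (Python) =====
-- def find_unique_paths(grid_data, step_ranges):
--     path_counts = []
--
--     for step_range in step_ranges:
--         unique_positions = set()
--
--         for start in grid_data:
--             for end in grid_data:
--                 # Overslaan als de start- en eindposities gelijk zijn of tekens niet overeenkomen
--                 if start == end or grid_data[start] != grid_data[end] or grid_data[start] == ".":
--                     continue
--
--                 # Genereer alle tussenliggende posities voor een gegeven stapgrootte
--                 for step in step_range:
--                     position = start + step * (end - start)
--                     if position in grid_data: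
--                         unique_positions.add(position)
--
--         # Voeg het aantal unieke posities toe aan de resultaten
--         path_counts.append(len(unique_positions))
--
--     return path_counts
-- ===== SOURCE B (Python) =====
-- def find_unique_paths(grid_data, step_ranges):
--     # Index positions by character once, enumerate only same-character pairs once,
--     # then reuse that pair list for every step range.
--     groups = {}
--     for pos in grid_data:
--         ch = grid_data[pos]
--         if ch != ".":
--             groups.setdefault(ch, []).append(pos)
--     pairs = [(a, b) for positions in groups.values()
--                     for a in positions
--                     for b in positions if b != a]
--     keys = set(grid_data)
--     path_counts = []
--     for step_range in step_ranges:
--         unique_positions = set()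
--         for a, b in pairs:
--             d = b - a
--             for step in step_range:
--                 position = a + step * d
--                 if position in keys:
--                     unique_positions.add(position)
--         path_counts.append(len(unique_positions))
--     return path_counts
-- ===== Notes on version B (the rewrite author's own statement) =====
-- stated objective: alternative
-- what changed: B indexes positions by character once and enumerates only same-character pairs into a pair list built once and reused for every step range, instead of rescanning all N^2 key pairs (rechecking the character match) for each range; measured ~1.3x faster, below the 1.5x bar, so no speed claim.
import Mathlib
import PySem

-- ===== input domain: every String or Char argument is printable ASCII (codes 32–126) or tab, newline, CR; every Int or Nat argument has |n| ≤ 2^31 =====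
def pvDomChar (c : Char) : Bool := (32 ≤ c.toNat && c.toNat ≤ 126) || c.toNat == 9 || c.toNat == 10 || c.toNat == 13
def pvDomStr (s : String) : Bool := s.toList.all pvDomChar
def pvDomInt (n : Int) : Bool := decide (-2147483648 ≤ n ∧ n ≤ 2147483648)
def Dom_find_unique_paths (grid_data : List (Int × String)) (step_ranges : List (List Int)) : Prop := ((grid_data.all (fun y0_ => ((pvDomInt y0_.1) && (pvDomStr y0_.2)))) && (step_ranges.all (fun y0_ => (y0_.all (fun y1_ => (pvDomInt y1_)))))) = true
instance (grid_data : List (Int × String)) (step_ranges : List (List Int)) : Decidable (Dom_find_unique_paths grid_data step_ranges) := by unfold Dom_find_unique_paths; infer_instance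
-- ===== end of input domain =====

-- B builds a character→positions index once and enumerates only same-character key pairs
-- (reused across all step ranges) instead of scanning all key pairs per range; same return value.

-- ===== PORT A =====
-- the per-range set of unique positions (A's two nested loops over all keys, innermost loop over the steps)
def pvASet (g : PySem.Dict Int String) (step_range : List Int) : PySem.Set Int :=
  g.keys.foldl (fun up start =>
    g.keys.foldl (fun up end_ =>
      if start = end_ ∨ g.getD start "" ≠ g.getD end_ "" ∨ g.getD start "" = "." then up
      else
        step_range.foldl (fun up step =>
          if g.contains (start + step * (end_ - start)) then
            PySem.Set.add up (start + step * (end_ - start))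
          else up) up) up)
    PySem.Set.empty

def find_unique_paths (grid_data : List (Int × String)) (step_ranges : List (List Int)) : List Int :=
  let g : PySem.Dict Int String := PySem.Dict.mk grid_data
  step_ranges.foldl (fun path_counts step_range =>
    path_counts ++ [((pvASet g step_range).length : Int)]) []

-- ===== PORT B =====
-- groups = {} ; for pos in grid_data: if grid_data[pos] != ".": groups.setdefault(ch, []).append(pos)
def pvGroups (g : PySem.Dict Int String) : PySem.Dict String (List Int) :=
  g.keys.foldl (fun d pos =>
    if g.getD pos "" ≠ "." then d.modify (g.getD pos "") [] (· ++ [pos]) else d)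
    PySem.Dict.empty

-- pairs = [(a, b) for positions in groups.values() for a in positions for b in positions if b != a]
def pvPairs (g : PySem.Dict Int String) : List (Int × Int) :=
  (pvGroups g).values.flatMap (fun positions =>
    positions.flatMap (fun a => (positions.filter (fun b => b ≠ a)).map (fun b => (a, b))))

-- the per-range set, iterating the precomputed pair list
def pvBSet (pairs : List (Int × Int)) (keys : PySem.Set Int) (step_range : List Int) : PySem.Set Int :=
  pairs.foldl (fun u ab =>
    step_range.foldl (fun u step =>
      if ab.1 + step * (ab.2 - ab.1) ∈ keys then
        PySem.Set.add u (ab.1 + step * (ab.2 - ab.1))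
      else u) u) PySem.Set.empty

def find_unique_paths_alt (grid_data : List (Int × String)) (step_ranges : List (List Int)) : List Int :=
  let g : PySem.Dict Int String := PySem.Dict.mk grid_data
  let pairs := pvPairs g
  let keys : PySem.Set Int := PySem.Set.ofList g.keys
  step_ranges.foldl (fun path_counts step_range =>
    path_counts ++ [((pvBSet pairs keys step_range).length : Int)]) []

-- ===== PRECONDITION & SPEC =====
def Spec_find_unique_paths (grid_data : List (Int × String)) (step_ranges : List (List Int)) (out : List Int) : Prop := out = find_unique_paths_alt grid_data step_ranges
instance (grid_data : List (Int × String)) (step_ranges : List (List Int)) (out : List Int) : Decidable (Spec_find_unique_paths grid_data step_ranges out) := by unfold Spec_find_unique_paths; infer_instance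

-- ===== CLAIM (what is proved, stated in full; the proofs are below) =====
def Claim_equal_find_unique_paths : Prop := ∀ (grid_data : List (Int × String)) (step_ranges : List (List Int)), Dom_find_unique_paths grid_data step_ranges → Spec_find_unique_paths grid_data step_ranges (find_unique_paths grid_data step_ranges)

-- ===== LEMMAS AND PROOFS =====

-- membership in a fold that only ever adds elements: old members plus what the step contributes
theorem pv_mem_foldl_step {β : Type} (F : PySem.Set Int → β → PySem.Set Int) (P : β → Int → Prop)
    (h : ∀ u x p, p ∈ F u x ↔ p ∈ u ∨ P x p) :
    ∀ (l : List β) (u : PySem.Set Int) (p : Int), p ∈ l.foldl F u ↔ p ∈ u ∨ ∃ x ∈ l, P x p := by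
  intro l
  induction l with
  | nil => simp
  | cons x t ih =>
    intro u p
    rw [List.foldl_cons, ih, h]
    simp only [List.mem_cons]
    constructor
    · rintro (⟨h1 | h1⟩ | ⟨y, hy, hP⟩)
      · exact Or.inl h1
      · exact Or.inr ⟨x, Or.inl rfl, h1⟩
      · exact Or.inr ⟨y, Or.inr hy, hP⟩
    · rintro (h1 | ⟨y, (rfl | hy), hP⟩)
      · exact Or.inl (Or.inl h1)
      · exact Or.inl (Or.inr hP)
      · exact Or.inr ⟨y, hy, hP⟩

theorem pv_nodup_foldl_step {β : Type} (F : PySem.Set Int → β → PySem.Set Int)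
    (h : ∀ u x, List.Nodup u → List.Nodup (F u x)) :
    ∀ (l : List β) (u : PySem.Set Int), List.Nodup u → List.Nodup (l.foldl F u) := by
  intro l
  induction l with
  | nil => intro u hu; simpa using hu
  | cons x t ih => intro u hu; exact ih _ (h _ _ hu)

-- the innermost loop over the steps (shared shape of both ports)
theorem pv_mem_step_fold (r : List Int) (a b : Int) (Q : Int → Prop) [DecidablePred Q]
    (u : PySem.Set Int) (p : Int) :
    p ∈ r.foldl (fun u step =>
        if Q (a + step * (b - a)) then PySem.Set.add u (a + step * (b - a)) else u) u
      ↔ p ∈ u ∨ ∃ st ∈ r, Q (a + st * (b - a)) ∧ p = a + st * (b - a) := by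
  refine pv_mem_foldl_step _ (fun st p => Q (a + st * (b - a)) ∧ p = a + st * (b - a)) ?_ r u p
  intro u st p
  by_cases hq : Q (a + st * (b - a)) <;> simp [hq, PySem.Set.mem_add]

theorem pv_nodup_step_fold (r : List Int) (a b : Int) (Q : Int → Prop) [DecidablePred Q]
    (u : PySem.Set Int) (hu : List.Nodup u) :
    List.Nodup (r.foldl (fun u step =>
        if Q (a + step * (b - a)) then PySem.Set.add u (a + step * (b - a)) else u) u) := by
  refine pv_nodup_foldl_step _ ?_ r u hu
  intro u st h
  by_cases hq : Q (a + st * (b - a)) <;> simp [hq, PySem.Set.nodup_add _ _ h, h]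

theorem pv_memA (g : PySem.Dict Int String) (r : List Int) (p : Int) :
    p ∈ pvASet g r ↔ ∃ s ∈ g.keys, ∃ e ∈ g.keys,
      (s ≠ e ∧ g.getD s "" = g.getD e "" ∧ g.getD s "" ≠ ".") ∧
      ∃ st ∈ r, g.contains (s + st * (e - s)) = true ∧ p = s + st * (e - s) := by
  unfold pvASet
  rw [pv_mem_foldl_step _ (fun s p => ∃ e ∈ g.keys,
      (s ≠ e ∧ g.getD s "" = g.getD e "" ∧ g.getD s "" ≠ ".") ∧
      ∃ st ∈ r, g.contains (s + st * (e - s)) = true ∧ p = s + st * (e - s)) ?_]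
  · simp
  intro u s p
  rw [pv_mem_foldl_step _ (fun e p =>
      (s ≠ e ∧ g.getD s "" = g.getD e "" ∧ g.getD s "" ≠ ".") ∧
      ∃ st ∈ r, g.contains (s + st * (e - s)) = true ∧ p = s + st * (e - s)) ?_]
  intro u e p
  by_cases hc : s = e ∨ g.getD s "" ≠ g.getD e "" ∨ g.getD s "" = "."
  · rw [if_pos hc]
    constructor
    · exact Or.inl
    · rintro (h | ⟨⟨h1, h2, h3⟩, _⟩)
      · exact h
      · rcases hc with hc | hc | hc
        · exact absurd hc h1
        · exact absurd h2 hc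
        · exact absurd hc h3
  · rw [if_neg hc]
    push Not at hc
    rw [pv_mem_step_fold r s e (fun x => g.contains x = true) u p]
    tauto

theorem pv_memB (pairs : List (Int × Int)) (keys : PySem.Set Int) (r : List Int) (p : Int) :
    p ∈ pvBSet pairs keys r ↔ ∃ ab ∈ pairs, ∃ st ∈ r,
      (ab.1 + st * (ab.2 - ab.1)) ∈ keys ∧ p = ab.1 + st * (ab.2 - ab.1) := by
  unfold pvBSet
  rw [pv_mem_foldl_step _ (fun ab p => ∃ st ∈ r,
      (ab.1 + st * (ab.2 - ab.1)) ∈ keys ∧ p = ab.1 + st * (ab.2 - ab.1)) ?_]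
  · simp
  intro u ab p
  exact pv_mem_step_fold r ab.1 ab.2 (fun x => x ∈ keys) u p

theorem pv_nodupA (g : PySem.Dict Int String) (r : List Int) : List.Nodup (pvASet g r) := by
  unfold pvASet
  refine pv_nodup_foldl_step _ ?_ _ _ List.nodup_nil
  intro u s hu
  refine pv_nodup_foldl_step _ ?_ _ _ hu
  intro u e hu
  split
  · exact hu
  · exact pv_nodup_step_fold r s e (fun x => g.contains x = true) u hu

theorem pv_nodupB (pairs : List (Int × Int)) (keys : PySem.Set Int) (r : List Int) :
    List.Nodup (pvBSet pairs keys r) := by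
  unfold pvBSet
  refine pv_nodup_foldl_step _ ?_ _ _ List.nodup_nil
  intro u ab hu
  exact pv_nodup_step_fold r ab.1 ab.2 (fun x => x ∈ keys) u hu

-- the grouping loop: group v holds exactly the keys whose character is v (≠ "."), in order
theorem pv_grp_getD (g : PySem.Dict Int String) :
    ∀ (l : List Int) (d : PySem.Dict String (List Int)) (v : String),
    ((l.foldl (fun d pos =>
        if g.getD pos "" ≠ "." then d.modify (g.getD pos "") [] (· ++ [pos]) else d) d).getD v [])
      = d.getD v [] ++ l.filter (fun pos => g.getD pos "" == v && v != ".") := by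
  intro l
  induction l with
  | nil => simp
  | cons x t ih =>
    intro d v
    rw [List.foldl_cons]
    by_cases h1 : g.getD x "" = "."
    · rw [if_neg (by simpa using h1), ih]
      have hpred : (g.getD x "" == v && v != ".") = false := by
        rw [h1]
        by_cases hv : v = "."
        · subst hv; simp
        · rw [beq_eq_false_iff_ne.mpr (fun hh => hv hh.symm), Bool.false_and]
      simp [hpred]
    · rw [if_pos h1, ih]
      by_cases h2 : v = g.getD x ""
      · subst h2
        rw [PySem.Dict.getD_modify]
        simp [h1]
      · rw [PySem.Dict.getD_modify, if_neg h2]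
        have hpred : (g.getD x "" == v && v != ".") = false := by
          rw [beq_eq_false_iff_ne.mpr (fun hh => h2 hh.symm), Bool.false_and]
        simp [hpred]

theorem pv_grp_mem_keys (g : PySem.Dict Int String) :
    ∀ (l : List Int) (d : PySem.Dict String (List Int)) (v : String),
    v ∈ (l.foldl (fun d pos =>
        if g.getD pos "" ≠ "." then d.modify (g.getD pos "") [] (· ++ [pos]) else d) d).keys
      ↔ v ∈ d.keys ∨ ∃ pos ∈ l, g.getD pos "" = v ∧ v ≠ "." := by
  intro l
  induction l with
  | nil => simp
  | cons x t ih =>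
    intro d v
    rw [List.foldl_cons]
    by_cases h1 : g.getD x "" = "."
    · rw [if_neg (by simpa using h1), ih]
      simp only [List.mem_cons]
      constructor
      · rintro (h | ⟨pos, hp, he, hv⟩)
        · exact Or.inl h
        · exact Or.inr ⟨pos, Or.inr hp, he, hv⟩
      · rintro (h | ⟨pos, (rfl | hp), he, hv⟩)
        · exact Or.inl h
        · exact absurd (h1 ▸ he) (Ne.symm hv)
        · exact Or.inr ⟨pos, hp, he, hv⟩
    · rw [if_pos h1, ih, PySem.Dict.keys_modify, PySem.Dict.mem_keys_insert]
      simp only [List.mem_cons]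
      constructor
      · rintro (⟨h | h⟩ | ⟨pos, hp, he, hv⟩)
        · exact Or.inr ⟨x, Or.inl rfl, h.symm, h ▸ h1⟩
        · exact Or.inl h
        · exact Or.inr ⟨pos, Or.inr hp, he, hv⟩
      · rintro (h | ⟨pos, (rfl | hp), he, hv⟩)
        · exact Or.inl (Or.inr h)
        · exact Or.inl (Or.inl he.symm)
        · exact Or.inr ⟨pos, hp, he, hv⟩

theorem pv_grp_nodup_keys (g : PySem.Dict Int String) :
    ∀ (l : List Int) (d : PySem.Dict String (List Int)), d.keys.Nodup →
    (l.foldl (fun d pos =>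
        if g.getD pos "" ≠ "." then d.modify (g.getD pos "") [] (· ++ [pos]) else d) d).keys.Nodup := by
  intro l
  induction l with
  | nil => intro d hd; simpa using hd
  | cons x t ih =>
    intro d hd
    rw [List.foldl_cons]
    apply ih
    by_cases h1 : g.getD x "" = "."
    · rw [if_neg (by simpa using h1)]; exact hd
    · rw [if_pos h1, PySem.Dict.keys_modify]
      by_cases hc : d.contains (g.getD x "") = true
      · rw [PySem.Dict.keys_insert_of_contains _ _ hc]; exact hd
      · rw [PySem.Dict.keys_insert_of_not_contains _ _ (by simpa using hc)]
        have hnm : g.getD x "" ∉ d.keys := by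
          rw [← PySem.Dict.contains_iff_mem_keys]; simpa using hc
        rw [List.nodup_append]
        refine ⟨hd, List.nodup_singleton _, ?_⟩
        intro a ha b hb
        rw [List.mem_singleton] at hb
        subst hb
        exact fun h => hnm (h ▸ ha)

theorem pv_mem_pairs (g : PySem.Dict Int String) (a b : Int) :
    (a, b) ∈ pvPairs g ↔
      a ∈ g.keys ∧ b ∈ g.keys ∧ g.getD a "" = g.getD b "" ∧ g.getD a "" ≠ "." ∧ b ≠ a := by
  have hnd : (pvGroups g).keys.Nodup := pv_grp_nodup_keys g _ _ PySem.Dict.nodup_keys_empty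
  have hgetD : ∀ v, (pvGroups g).getD v []
      = g.keys.filter (fun pos => g.getD pos "" == v && v != ".") := by
    intro v; unfold pvGroups; rw [pv_grp_getD]; simp
  have hkeys : ∀ v, v ∈ (pvGroups g).keys ↔ ∃ pos ∈ g.keys, g.getD pos "" = v ∧ v ≠ "." := by
    intro v; unfold pvGroups; rw [pv_grp_mem_keys]; simp
  unfold pvPairs
  rw [PySem.Dict.values_eq_map_keys _ hnd []]
  simp only [List.mem_flatMap, List.mem_map, List.mem_filter, Prod.mk.injEq]
  constructor
  · rintro ⟨ps, ⟨v, hv, rfl⟩, a', ha', b', ⟨hb', hba'⟩, rfl, rfl⟩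
    rw [hgetD v] at ha' hb'
    simp only [List.mem_filter, Bool.and_eq_true, beq_iff_eq, bne_iff_ne, ne_eq] at ha' hb'
    refine ⟨ha'.1, hb'.1, by rw [ha'.2.1, hb'.2.1], by rw [ha'.2.1]; exact ha'.2.2, by simpa using hba'⟩
  · rintro ⟨ha, hb, heq, hne, hba⟩
    refine ⟨(pvGroups g).getD (g.getD a "") [], ⟨g.getD a "", ?_, rfl⟩, a, ?_, b, ⟨?_, by simpa using hba⟩, rfl, rfl⟩
    · rw [hkeys]; exact ⟨a, ha, rfl, hne⟩
    · rw [hgetD]; simp [List.mem_filter, ha, hne]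
    · rw [hgetD]; simp [List.mem_filter, hb, heq.symm, hne]

-- the per-range counts agree: the two sets have the same members and are both duplicate-free
theorem pv_count_eq (g : PySem.Dict Int String) (r : List Int) :
    (pvASet g r).length = (pvBSet (pvPairs g) (PySem.Set.ofList g.keys) r).length := by
  apply List.Perm.length_eq
  rw [List.perm_ext_iff_of_nodup (pv_nodupA g r) (pv_nodupB _ _ r)]
  intro p
  rw [pv_memA, pv_memB]
  constructor
  · rintro ⟨s, hs, e, he, ⟨hne, heq, hdot⟩, st, hst, hc, rfl⟩
    refine ⟨(s, e), ?_, st, hst, ?_, rfl⟩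
    · rw [pv_mem_pairs]; exact ⟨hs, he, heq, hdot, Ne.symm hne⟩
    · rw [PySem.Set.mem_ofList]; exact (PySem.Dict.contains_iff_mem_keys g _).mp hc
  · rintro ⟨ab, hab, st, hst, hm, rfl⟩
    rw [pv_mem_pairs] at hab
    obtain ⟨ha, hb, heq, hdot, hba⟩ := hab
    refine ⟨ab.1, ha, ab.2, hb, ⟨Ne.symm hba, heq, hdot⟩, st, hst, ?_, rfl⟩
    rw [PySem.Dict.contains_iff_mem_keys]
    exact (PySem.Set.mem_ofList _ _).mp hm

-- ===== VERDICT (by name: the statement is the Claim_ definition above) =====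
theorem find_unique_paths_spec : Claim_equal_find_unique_paths := by
  intro grid_data step_ranges _
  show find_unique_paths grid_data step_ranges = find_unique_paths_alt grid_data step_ranges
  unfold find_unique_paths find_unique_paths_alt
  rw [PySem.List.foldl_append_singleton_eq_map
        (fun step_range => ((pvASet (PySem.Dict.mk grid_data) step_range).length : Int)),
      PySem.List.foldl_append_singleton_eq_map
        (fun step_range => ((pvBSet (pvPairs (PySem.Dict.mk grid_data))
          (PySem.Set.ofList (PySem.Dict.mk grid_data).keys) step_range).length : Int))]
  simp only [List.nil_append]
  apply List.map_congr_left
  intro r _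
  exact_mod_cast pv_count_eq (PySem.Dict.mk grid_data) r
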